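-- pv_equiv track=rewrite | github.com/Britva4ka/lectures | hw8/bigger_than_half.py | bigger_then_half
-- ===== SOURCE A (Python) =====
-- import math         #Складність 6/10 цікавість 6/10
--
-- def bigger_then_half(array): #Задачка наче проста в плані написання коду, але складна в плані зрозуміти який потрібен алгоритм
--     array.sort() #Додав цей метод щоб можна була в разнобій числа задавати
--     half = math.ceil(len(array) / 2) #ceil округляє в більшу сторону
--     for x in array:
--         count = 0
--         for i in array:
--             if x > i:
--                 count += 1
--                 if count == half:
--                     return x
-- ===== SOURCE B (Python) =====
-- def bigger_then_half(array):
--     # Sort once, then a single scan over adjacent pairs: the first index i >= half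
--     # that starts a new value is the first (smallest) value with >= half strictly
--     # smaller elements.  (Sorts `array` in place, just like the original.)
--     array.sort()
--     half = -(-len(array) // 2)  # math.ceil(len/2)
--     for i in range(1, len(array)):
--         if array[i] != array[i - 1] and i >= half:
--             return array[i]
-- ===== Notes on version B (the rewrite author's own statement) =====
-- stated objective: faster
-- what changed: Replaces A's quadratic nested scan (for each element, re-count all strictly smaller elements) by one sort plus a single adjacent-pair scan returning the first value whose first occurrence index reaches half.
import Mathlib
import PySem

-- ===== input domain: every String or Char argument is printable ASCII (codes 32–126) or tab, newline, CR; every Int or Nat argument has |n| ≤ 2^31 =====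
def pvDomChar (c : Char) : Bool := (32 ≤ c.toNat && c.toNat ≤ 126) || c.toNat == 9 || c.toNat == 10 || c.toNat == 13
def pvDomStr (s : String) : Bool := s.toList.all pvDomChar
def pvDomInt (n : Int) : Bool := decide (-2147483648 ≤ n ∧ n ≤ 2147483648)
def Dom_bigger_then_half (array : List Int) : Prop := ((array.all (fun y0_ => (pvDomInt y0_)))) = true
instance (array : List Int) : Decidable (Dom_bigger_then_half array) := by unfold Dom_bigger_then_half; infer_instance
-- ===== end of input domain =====

-- B replaces A's O(n^2) nested counting scan by sort + one adjacent-pair scan (asymptotically faster).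
-- Both A and B sort the Python argument in place; the equivalence proved here is about the return value.

-- ===== PORT A =====
-- inner 'for i in array' loop of A, with the running count
def bthInner (x : Int) (half : Int) : List Int → Int → Option Int
  | [], _ => none
  | i :: t, count =>
    if x > i then
      if count + 1 = half then some x
      else bthInner x half t (count + 1)
    else bthInner x half t count

-- outer 'for x in array' loop of A (s is the sorted array, iterated by both loops)
def bthOuter (s : List Int) (half : Int) : List Int → Option Int
  | [] => none
  | x :: t =>
    match bthInner x half s 0 with
    | some r => some r
    | none => bthOuter s half t

def bigger_then_half (array : List Int) : Option Int :=
  let s := PySem.List.sorted array (fun v => v) false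
  -- math.ceil(n/2) = (n+1)/2 for a nonnegative length; Lean's Int division agrees here
  let half : Int := ((s.length : Int) + 1) / 2
  bthOuter s half s

-- ===== PORT B =====
-- the 'for i in range(1, len(array))' scan of B: i is the index, prev = array[i-1]
def bthScan (half : Int) : Int → Int → List Int → Option Int
  | _, _, [] => none
  | i, prev, x :: t =>
    if x ≠ prev ∧ i ≥ half then some x
    else bthScan half (i + 1) x t

def bigger_then_half_alt (array : List Int) : Option Int :=
  let s := PySem.List.sorted array (fun v => v) false
  let half : Int := ((s.length : Int) + 1) / 2   -- -(-n // 2) = ceil(n/2)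
  match s with
  | [] => none
  | p :: rest => bthScan half 1 p rest

-- ===== PRECONDITION & SPEC =====
def Spec_bigger_then_half (array : List Int) (out : Option Int) : Prop := out = bigger_then_half_alt array
instance (array : List Int) (out : Option Int) : Decidable (Spec_bigger_then_half array out) := by unfold Spec_bigger_then_half; infer_instance

-- ===== CLAIM (what is proved, stated in full; the proofs are below) =====
def Claim_equal_bigger_then_half : Prop := ∀ (array : List Int), Dom_bigger_then_half array → Spec_bigger_then_half array (bigger_then_half array)

-- ===== LEMMAS AND PROOFS =====

-- number of elements of s strictly below x, as an Int
def cLess (s : List Int) (x : Int) : Int := (s.countP (fun i => decide (i < x)) : Int)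

theorem bthInner_eq (x half : Int) :
    ∀ (rest : List Int) (count : Int), count < half →
      bthInner x half rest count =
        (if half ≤ count + cLess rest x then some x else none) := by
  intro rest
  induction rest with
  | nil =>
    intro count h
    simp [bthInner, cLess]
    omega
  | cons i t ih =>
    intro count h
    by_cases hxi : x > i
    · by_cases hc : count + 1 = half
      · have : half ≤ count + cLess (i :: t) x := by
          simp [cLess, hxi]
          omega
        simp [bthInner, hxi, hc, this]
      · have h' : count + 1 < half := by omega
        have := ih (count + 1) h'
        simp [bthInner, hxi, hc, this]
        have : cLess (i :: t) x = cLess t x + 1 := by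
          simp [cLess, hxi]
        rw [this]
        by_cases hh : half ≤ count + 1 + cLess t x <;> simp [hh] <;> omega
    · have := ih count h
      have hcc : cLess (i :: t) x = cLess t x := by
        simp [cLess, hxi]
      simp [bthInner, hxi, this, hcc]

theorem bthOuter_eq (s : List Int) (half : Int) (hh : 0 < half) :
    ∀ (l : List Int),
      bthOuter s half l = l.find? (fun x => decide (half ≤ cLess s x)) := by
  intro l
  induction l with
  | nil => simp [bthOuter]
  | cons x t ih =>
    rw [bthOuter, bthInner_eq x half s 0 (by omega), List.find?_cons]
    by_cases hc : half ≤ cLess s x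
    · simp [hc]
    · simp [hc, ih]

theorem bthScan_eq (s : List Int) (half : Int) (hs : s.Pairwise (· ≤ ·)) :
    ∀ (rest done : List Int) (prev : Int),
      s = done ++ rest →
      prev ∈ done →
      (∀ y ∈ done, y ≤ prev) →
      (∀ y ∈ done, cLess s y < half) →
      bthScan half (done.length : Int) prev rest =
        rest.find? (fun x => decide (half ≤ cLess s x)) := by
  intro rest
  induction rest with
  | nil => intro done prev _ _ _ _; simp [bthScan]
  | cons x t ih =>
    intro done prev hsplit hprev hle hlt
    have hsorted_split := hsplit ▸ hs
    have hcross : ∀ y ∈ done, ∀ z ∈ x :: t, y ≤ z := by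
      have := (List.pairwise_append.mp hsorted_split).2.2
      exact this
    have hsuffix : (x :: t).Pairwise (· ≤ ·) :=
      (List.pairwise_append.mp hsorted_split).2.1
    by_cases hxp : x = prev
    · -- duplicate of the previous value: both sides skip
      have hcx : cLess s x < half := hxp ▸ hlt prev hprev
      have hfind : (decide (half ≤ cLess s x)) = false := by simp; omega
      rw [bthScan, List.find?_cons]
      simp only [hfind]
      have hstep := ih (done ++ [x]) x (by simp [hsplit]) (by simp)
        (by intro y hy; rcases List.mem_append.mp hy with h | h
            · exact le_of_le_of_eq (hle y h) hxp.symm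
            · simp at h; omega)
        (by intro y hy; rcases List.mem_append.mp hy with h | h
            · exact hlt y h
            · simp at h; subst h; exact hcx)
      have hlen : ((done ++ [x]).length : Int) = (done.length : Int) + 1 := by
        simp
      rw [hlen] at hstep
      simpa [hxp] using hstep
    · -- new value: its strictly-smaller count is exactly the current index
      have hpx : prev < x := by
        have := hcross prev hprev x (by simp)
        omega
      have hcx : cLess s x = (done.length : Int) := by
        have hdone : done.countP (fun i => decide (i < x)) = done.length := by
          rw [List.countP_eq_length]
          intro y hy
          have := hle y hy
          simp; omega
        have hrest : (x :: t).countP (fun i => decide (i < x)) = 0 := by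
          rw [List.countP_eq_zero]
          intro z hz
          rcases List.mem_cons.mp hz with rfl | hz'
          · simp
          · have := (List.pairwise_cons.mp hsuffix).1 z hz'
            simp; omega
        simp [cLess, hsplit, List.countP_append, hdone, hrest]
      by_cases hi : (done.length : Int) ≥ half
      · have hfind : (decide (half ≤ cLess s x)) = true := by
          simp [hcx]; omega
        rw [bthScan, List.find?_cons]
        simp only [hfind]
        simp [hxp, hi]
      · have hfind : (decide (half ≤ cLess s x)) = false := by
          simp [hcx]; omega
        rw [bthScan, List.find?_cons]
        simp only [hfind]
        have hstep := ih (done ++ [x]) x (by simp [hsplit]) (by simp)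
          (by intro y hy; rcases List.mem_append.mp hy with h | h
              · have := hle y h; omega
              · simp at h; omega)
          (by intro y hy; rcases List.mem_append.mp hy with h | h
              · exact hlt y h
              · simp at h; subst h; omega)
        have hlen : ((done ++ [x]).length : Int) = (done.length : Int) + 1 := by
          simp
        rw [hlen] at hstep
        simp [hxp, hi]
        exact hstep

theorem bth_main (s : List Int) :
    s.Pairwise (· ≤ ·) →
    bthOuter s (((s.length : Int) + 1) / 2) s =
      (match s with
       | [] => none
       | p :: rest => bthScan (((s.length : Int) + 1) / 2) 1 p rest) := by
  intro hs
  cases s with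
  | nil => simp [bthOuter]
  | cons p rest =>
    have hhalf : 0 < (((p :: rest).length : Int) + 1) / 2 := by
      simp; omega
    rw [bthOuter_eq _ _ hhalf]
    have hcp : cLess (p :: rest) p = 0 := by
      have hmin : ∀ z ∈ p :: rest, p ≤ z := by
        intro z hz
        rcases List.mem_cons.mp hz with rfl | hz'
        · exact le_refl _
        · exact (List.pairwise_cons.mp hs).1 z hz'
      simp only [cLess]
      rw [List.countP_eq_zero.mpr]
      · simp
      · intro z hz; have := hmin z hz; simp; omega
    have hfindp :
        (decide ((((p :: rest).length : Int) + 1) / 2 ≤ cLess (p :: rest) p)) = false := by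
      rw [hcp]; simp; omega
    rw [List.find?_cons]
    simp only [hfindp]
    have hstep := bthScan_eq (p :: rest) ((((p :: rest).length : Int) + 1) / 2) hs rest [p] p
      rfl (by simp) (by simp)
      (by intro y hy
          have : y = p := by simpa using hy
          subst this; rw [hcp]; exact hhalf)
    simpa using hstep.symm

-- ===== VERDICT (by name: the statement is the Claim_ definition above) =====
theorem bigger_then_half_spec : Claim_equal_bigger_then_half := by
  intro array _
  show bigger_then_half array = bigger_then_half_alt array
  have hs : (PySem.List.sorted array (fun v => v) false).Pairwise (· ≤ ·) := by
    simpa using PySem.List.sorted_pairwise (xs := array) (key := fun v => v)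
  exact bth_main (PySem.List.sorted array (fun v => v) false) hs
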